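-- pv_equiv track=rewrite | github.com/DiscoveryPiscine42Bangkok2025/discovery-piscine-coding-with-python-2026-Nattakorn123 | rush00/ex00/checkmate.py | check_queen
-- ===== SOURCE A (Python) =====
-- def is_valid_position(board, row, col):
--     if row < 0 or row >= len(board):
--         return False
--     if col < 0 or col >= len(board[row]):
--         return False
--     return True
--
-- def check_queen(board, king_row, king_col):
--     directions = [
--         (-1, 0), (1, 0), (0, -1), (0, 1),
--         (-1, -1), (-1, 1), (1, -1), (1, 1)
--     ]
--
--     for dr, dc in directions:
--         row = king_row + dr
--         col = king_col + dc
--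
--         while is_valid_position(board, row, col):
--             piece = board[row][col]
--
--             if piece != '.' and piece != ' ':
--                 if piece == 'Q':
--                     return True
--                 break
--
--             row += dr
--             col += dc
--
--     return False
-- ===== SOURCE B (Python) =====
-- def _clear_between(board, king_row, king_col, dr, dc):
--     # every square strictly between the king and the queen must exist and be empty
--     d = max(abs(dr), abs(dc))
--     sr = (dr > 0) - (dr < 0)
--     sc = (dc > 0) - (dc < 0)
--     for j in range(1, d):
--         r = king_row + j * sr
--         c = king_col + j * sc
--         if not (0 <= r < len(board) and 0 <= c < len(board[r])):
--             return False
--         if board[r][c] not in ('.', ' '):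
--             return False
--     return True
--
-- def check_queen(board, king_row, king_col):
--     for r, row in enumerate(board):
--         for c, piece in enumerate(row):
--             if piece != 'Q' or (r == king_row and c == king_col):
--                 continue
--             dr = r - king_row
--             dc = c - king_col
--             if dr != 0 and dc != 0 and abs(dr) != abs(dc):
--                 continue
--             if _clear_between(board, king_row, king_col, dr, dc):
--                 return True
--     return False
-- ===== Notes on version B (the rewrite author's own statement) =====
-- stated objective: alternative
-- what changed: A walks eight rays outward from the king square by square; B scans the board once for queens and, for each queen, checks row/column/diagonal alignment with the king and that every square strictly between is empty.
import Mathlib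
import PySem

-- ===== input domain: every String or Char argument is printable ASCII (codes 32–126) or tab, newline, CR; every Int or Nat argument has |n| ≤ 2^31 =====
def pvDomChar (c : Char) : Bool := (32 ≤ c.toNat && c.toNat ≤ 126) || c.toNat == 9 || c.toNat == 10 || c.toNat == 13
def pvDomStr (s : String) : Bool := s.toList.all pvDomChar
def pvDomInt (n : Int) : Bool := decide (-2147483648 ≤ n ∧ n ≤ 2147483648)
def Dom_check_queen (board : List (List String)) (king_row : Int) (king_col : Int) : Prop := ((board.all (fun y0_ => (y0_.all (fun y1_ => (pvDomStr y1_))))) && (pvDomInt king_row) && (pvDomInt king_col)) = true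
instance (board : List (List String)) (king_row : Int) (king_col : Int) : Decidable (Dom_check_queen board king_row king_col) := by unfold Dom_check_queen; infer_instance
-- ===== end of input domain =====

-- B scans the board once for queens and checks line-of-sight per queen, instead of A's eight ray walks
-- from the king (objective: alternative decomposition; return value only, neither version mutates).

-- ===== PORT A =====
def is_valid_position (board : List (List String)) (row col : Int) : Bool :=
  if row < 0 || (board.length : Int) ≤ row then false
  else if col < 0 || ((((PySem.List.pyGet? board row).getD []).length : Int)) ≤ col then false
  else true

-- board[row][col] (only evaluated after is_valid_position, so the defaults are never hit)
def pieceAtA (board : List (List String)) (row col : Int) : String :=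
  PySem.List.pyGetD ((PySem.List.pyGet? board row).getD []) col ""

-- the while loop of A; fuel bounds the number of iterations (the walk provably leaves the board
-- within board.length + max row length steps, so the fuel below never changes the result)
def walkA (board : List (List String)) (dr dc : Int) : Int → Int → Nat → Bool
  | _, _, 0 => false
  | row, col, Nat.succ fuel =>
    if is_valid_position board row col then
      let piece := pieceAtA board row col
      if piece != "." && piece != " " then piece == "Q"
      else walkA board dr dc (row + dr) (col + dc) fuel
    else false

def fuelFor (board : List (List String)) : Nat :=
  board.length + board.foldr (fun row m => Nat.max row.length m) 0 + 1

def check_queen (board : List (List String)) (king_row : Int) (king_col : Int) : Bool :=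
  [((-1 : Int), (0 : Int)), (1, 0), (0, -1), (0, 1), (-1, -1), (-1, 1), (1, -1), (1, 1)].any
    (fun d => walkA board d.1 d.2 (king_row + d.1) (king_col + d.2) (fuelFor board))

-- ===== PORT B =====
-- is_empty_at of Source B: the square exists on the (possibly ragged) board and holds '.' or ' '
-- (.toNat is only reached under the 0 ≤ guard, so it is exact)
def emptyAtB (board : List (List String)) (r c : Int) : Bool :=
  decide (0 ≤ r) && decide (r < (board.length : Int)) &&
  (let row := (board[r.toNat]?).getD []
   decide (0 ≤ c) && decide (c < (row.length : Int)) &&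
   (let p := (row[c.toNat]?).getD ""
    p == "." || p == " "))

-- _clear_between of Source B
def clear_between (board : List (List String)) (king_row king_col dr dc : Int) : Bool :=
  let d := Nat.max dr.natAbs dc.natAbs
  let sr := Int.sign dr
  let sc := Int.sign dc
  (List.range' 1 (d - 1)).all
    (fun j => emptyAtB board (king_row + (j : Int) * sr) (king_col + (j : Int) * sc))

def check_queen_alt (board : List (List String)) (king_row : Int) (king_col : Int) : Bool :=
  (PySem.List.enumerate board 0).any (fun p =>
    (PySem.List.enumerate p.2 0).any (fun q =>
      !(q.2 != "Q" || (p.1 == king_row && q.1 == king_col)) &&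
      (let dr := p.1 - king_row
       let dc := q.1 - king_col
       !(dr != 0 && dc != 0 && (dr.natAbs != dc.natAbs)) &&
       clear_between board king_row king_col dr dc)))

-- ===== PRECONDITION & SPEC =====
def Spec_check_queen (board : List (List String)) (king_row : Int) (king_col : Int) (out : Bool) : Prop := out = check_queen_alt board king_row king_col
instance (board : List (List String)) (king_row : Int) (king_col : Int) (out : Bool) : Decidable (Spec_check_queen board king_row king_col out) := by unfold Spec_check_queen; infer_instance

-- ===== CLAIM (what is proved, stated in full; the proofs are below) =====
def Claim_equal_check_queen : Prop := ∀ (board : List (List String)) (king_row : Int) (king_col : Int), Dom_check_queen board king_row king_col → Spec_check_queen board king_row king_col (check_queen board king_row king_col)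

-- ===== LEMMAS AND PROOFS =====

-- the row the int-index r designates (meaningful when 0 ≤ r < board.length)
def rowAt (b : List (List String)) (r : Int) : List String := (b[r.toNat]?).getD []

lemma valid_iff (b : List (List String)) (r c : Int) :
    is_valid_position b r c = true ↔
      0 ≤ r ∧ r < (b.length : Int) ∧ 0 ≤ c ∧ c < ((rowAt b r).length : Int) := by
  unfold is_valid_position rowAt
  by_cases hr0 : 0 ≤ r
  · rw [PySem.List.pyGet?_of_nonneg b hr0]
    split_ifs with h1 h2 <;> simp_all <;> omega
  · split_ifs with h1 h2 <;> simp_all <;> omega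

lemma pieceAtA_eq (b : List (List String)) (r c : Int) (hr : 0 ≤ r) (hc : 0 ≤ c)
    (hcl : c < ((rowAt b r).length : Int)) :
    pieceAtA b r c = ((rowAt b r)[c.toNat]?).getD "" := by
  unfold pieceAtA rowAt at *
  rw [PySem.List.pyGet?_of_nonneg b hr]
  have h2 : c.toNat < (b[r.toNat]?.getD []).length := by omega
  rw [PySem.List.pyGetD_eq_getElem _ _ hc (by omega)]
  simp [List.getElem?_eq_getElem h2]

lemma emptyAtB_iff (b : List (List String)) (r c : Int) :
    emptyAtB b r c = true ↔
      is_valid_position b r c = true ∧ (pieceAtA b r c = "." ∨ pieceAtA b r c = " ") := by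
  rw [valid_iff]
  unfold emptyAtB
  by_cases hr0 : 0 ≤ r
  · by_cases hrl : r < (b.length : Int)
    · by_cases hc0 : 0 ≤ c
      · by_cases hcl : c < (((b[r.toNat]?).getD []).length : Int)
        · have hp := pieceAtA_eq b r c hr0 hc0 (by simpa [rowAt] using hcl)
          simp [hr0, hrl, hc0, hp, rowAt]
        · have hb : b[r.toNat]? = some b[r.toNat] := List.getElem?_eq_getElem (by omega)
          simp only [hb, Option.getD_some] at hcl
          simp [hr0, hrl, hc0, rowAt]
          intro h
          exact absurd h hcl
      · simp [hc0]
    · simp [hrl]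
  · simp [hr0]

def Qat (b : List (List String)) (kr kc dr dc : Int) (k : Nat) : Prop :=
  is_valid_position b (kr + (k : Int) * dr) (kc + (k : Int) * dc) = true ∧
  pieceAtA b (kr + (k : Int) * dr) (kc + (k : Int) * dc) = "Q"

def ClearUpto (b : List (List String)) (kr kc dr dc : Int) (m k : Nat) : Prop :=
  ∀ j : Nat, m ≤ j → j < k → emptyAtB b (kr + (j : Int) * dr) (kc + (j : Int) * dc) = true

lemma walk_iff (b : List (List String)) (dr dc kr kc : Int) :
    ∀ (fuel m : Nat),
    walkA b dr dc (kr + (m : Int) * dr) (kc + (m : Int) * dc) fuel = true ↔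
      ∃ k : Nat, m ≤ k ∧ k < m + fuel ∧ Qat b kr kc dr dc k ∧ ClearUpto b kr kc dr dc m k := by
  intro fuel
  induction fuel with
  | zero =>
    intro m
    constructor
    · intro h; simp [walkA] at h
    · rintro ⟨k, hk1, hk2, -, -⟩; omega
  | succ fuel ih =>
    intro m
    by_cases hv : is_valid_position b (kr + (m : Int) * dr) (kc + (m : Int) * dc) = true
    · by_cases hemp : pieceAtA b (kr + (m : Int) * dr) (kc + (m : Int) * dc) = "." ∨
          pieceAtA b (kr + (m : Int) * dr) (kc + (m : Int) * dc) = " "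
      · have hlhs : walkA b dr dc (kr + (m : Int) * dr) (kc + (m : Int) * dc) (fuel + 1) =
            walkA b dr dc (kr + ((m + 1 : Nat) : Int) * dr) (kc + ((m + 1 : Nat) : Int) * dc) fuel := by
          have e1 : kr + (m : Int) * dr + dr = kr + ((m + 1 : Nat) : Int) * dr := by push_cast; ring
          have e2 : kc + (m : Int) * dc + dc = kc + ((m + 1 : Nat) : Int) * dc := by push_cast; ring
          rcases hemp with h | h <;> simp [walkA, hv, h, e1, e2]
        rw [hlhs, ih (m + 1)]
        constructor
        · rintro ⟨k, hk1, hk2, hQ, hcl⟩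
          refine ⟨k, by omega, by omega, hQ, ?_⟩
          intro j hj1 hj2
          rcases Nat.eq_or_lt_of_le hj1 with rfl | hlt
          · exact (emptyAtB_iff b _ _).2 ⟨hv, hemp⟩
          · exact hcl j hlt hj2
        · rintro ⟨k, hk1, hk2, hQ, hcl⟩
          have hkm : m ≠ k := by
            rintro rfl
            have h2 := hQ.2
            rcases hemp with h | h <;> rw [h] at h2 <;> simp at h2
          refine ⟨k, by omega, by omega, hQ, fun j hj1 hj2 => hcl j (by omega) hj2⟩
      · rw [not_or] at hemp
        have hlhs : walkA b dr dc (kr + (m : Int) * dr) (kc + (m : Int) * dc) (fuel + 1) =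
            (pieceAtA b (kr + (m : Int) * dr) (kc + (m : Int) * dc) == "Q") := by
          simp [walkA, hv, hemp.1, hemp.2]
        rw [hlhs]
        constructor
        · intro h
          exact ⟨m, le_refl m, by omega, ⟨hv, by simpa using h⟩,
            fun j hj1 hj2 => absurd hj1 (by omega)⟩
        · rintro ⟨k, hk1, hk2, hQ, hcl⟩
          rcases Nat.eq_or_lt_of_le hk1 with rfl | hlt
          · simpa using hQ.2
          · have hemj := hcl m (le_refl m) hlt
            rw [emptyAtB_iff] at hemj
            exact absurd hemj.2 (by simp [hemp.1, hemp.2])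
    · have hlhs : walkA b dr dc (kr + (m : Int) * dr) (kc + (m : Int) * dc) (fuel + 1) = false := by
        simp [walkA, hv]
      rw [hlhs]
      constructor
      · intro h; simp at h
      · rintro ⟨k, hk1, hk2, hQ, hcl⟩
        rcases Nat.eq_or_lt_of_le hk1 with rfl | hlt
        · exact absurd hQ.1 hv
        · have hemj := hcl m (le_refl m) hlt
          rw [emptyAtB_iff] at hemj
          exact absurd hemj.1 hv

lemma row_le_max (b : List (List String)) (row : List String) (h : row ∈ b) :
    row.length ≤ b.foldr (fun row m => Nat.max row.length m) 0 := by
  induction b with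
  | nil => cases h
  | cons hd tl ih =>
    rcases List.mem_cons.1 h with rfl | h2
    · simp [List.foldr]
    · simp only [List.foldr]
      exact le_trans (ih h2) (Nat.le_max_right _ _)

lemma clear_between_iff (b : List (List String)) (kr kc dr' dc' : Int) :
    clear_between b kr kc dr' dc' = true ↔
      ClearUpto b kr kc dr'.sign dc'.sign 1 (Nat.max dr'.natAbs dc'.natAbs) := by
  unfold clear_between ClearUpto
  rw [List.all_eq_true]
  constructor
  · intro h j hj1 hj2
    exact h j (by rw [List.mem_range'_1]; omega)
  · intro h j hj
    rw [List.mem_range'_1] at hj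
    exact h j hj.1 (by omega)

lemma alt_iff (b : List (List String)) (kr kc : Int) :
    check_queen_alt b kr kc = true ↔
      ∃ (rk : Nat) (hr : rk < b.length) (ck : Nat) (hc : ck < (b[rk]).length),
        b[rk][ck] = "Q" ∧ ¬((rk : Int) = kr ∧ (ck : Int) = kc) ∧
        ((rk : Int) - kr = 0 ∨ (ck : Int) - kc = 0 ∨
          ((rk : Int) - kr).natAbs = ((ck : Int) - kc).natAbs) ∧
        clear_between b kr kc ((rk : Int) - kr) ((ck : Int) - kc) = true := by
  unfold check_queen_alt
  rw [List.any_eq_true]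
  constructor
  · rintro ⟨p, hp, hinner⟩
    rw [PySem.List.mem_enumerate_iff] at hp
    obtain ⟨rk, hr, rfl⟩ := hp
    rw [List.any_eq_true] at hinner
    obtain ⟨q, hq, hcond⟩ := hinner
    rw [PySem.List.mem_enumerate_iff] at hq
    obtain ⟨ck, hc, rfl⟩ := hq
    simp at hcond
    obtain ⟨⟨hQ, hne⟩, hal, hcb⟩ := hcond
    refine ⟨rk, hr, ck, hc, hQ, by tauto, by tauto, hcb⟩
  · rintro ⟨rk, hr, ck, hc, hQ, hne, hal, hcb⟩
    refine ⟨(0 + (rk : Int), b[rk]),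
      by rw [PySem.List.mem_enumerate_iff]; exact ⟨rk, hr, rfl⟩, ?_⟩
    rw [List.any_eq_true]
    refine ⟨(0 + (ck : Int), b[rk][ck]),
      by rw [PySem.List.mem_enumerate_iff]; exact ⟨ck, hc, rfl⟩, ?_⟩
    simp
    exact ⟨⟨hQ, by tauto⟩, by tauto, hcb⟩
lemma a_iff (b : List (List String)) (kr kc : Int) :
    check_queen b kr kc = true ↔
      ∃ dr dc : Int, ((dr, dc) ∈ [((-1 : Int), (0 : Int)), (1, 0), (0, -1), (0, 1), (-1, -1), (-1, 1), (1, -1), (1, 1)]) ∧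
        walkA b dr dc (kr + dr) (kc + dc) (fuelFor b) = true := by
  unfold check_queen
  rw [List.any_eq_true]
  constructor
  · rintro ⟨⟨dr, dc⟩, hmem, hw⟩
    exact ⟨dr, dc, hmem, by simpa using hw⟩
  · rintro ⟨dr, dc, hmem, hw⟩
    exact ⟨(dr, dc), hmem, by simpa using hw⟩

lemma sign_cases (a : Int) : a.sign = -1 ∨ a.sign = 0 ∨ a.sign = 1 := by
  rcases a with n | n
  · rcases n with _ | n <;> simp [Int.sign]
  · simp [Int.sign]

lemma dir_facts (dr dc : Int) (k : Nat) (hk : 1 ≤ k) (h1 : dr.natAbs ≤ 1) (h2 : dc.natAbs ≤ 1)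
    (h3 : ¬(dr = 0 ∧ dc = 0)) :
    ¬((k : Int) * dr = 0 ∧ (k : Int) * dc = 0) ∧
    ((k : Int) * dr = 0 ∨ (k : Int) * dc = 0 ∨ ((k : Int) * dr).natAbs = ((k : Int) * dc).natAbs) ∧
    Nat.max ((k : Int) * dr).natAbs ((k : Int) * dc).natAbs = k ∧
    ((k : Int) * dr).sign = dr ∧ ((k : Int) * dc).sign = dc := by
  have hdr : dr = -1 ∨ dr = 0 ∨ dr = 1 := by omega
  have hdc : dc = -1 ∨ dc = 0 ∨ dc = 1 := by omega
  have hks : ((k : Int)).sign = 1 := by simp; omega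
  have hsgn : ∀ d : Int, d = -1 ∨ d = 0 ∨ d = 1 → ((k : Int) * d).sign = d := by
    intro d hd
    rw [Int.sign_mul, hks, one_mul]
    rcases hd with rfl | rfl | rfl <;> decide
  have habs : ∀ d : Int, ((k : Int) * d).natAbs = k * d.natAbs := by
    intro d; rw [Int.natAbs_mul, Int.natAbs_natCast]
  refine ⟨?_, ?_, ?_, hsgn dr hdr, hsgn dc hdc⟩
  · rintro ⟨u1, u2⟩
    rcases hdr with rfl | rfl | rfl <;> rcases hdc with rfl | rfl | rfl
    all_goals try exact h3 ⟨rfl, rfl⟩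
    all_goals omega
  · rcases hdr with rfl | rfl | rfl <;> rcases hdc with rfl | rfl | rfl
    all_goals try exact absurd ⟨rfl, rfl⟩ h3
    all_goals simp
  · rw [habs dr, habs dc]
    rcases hdr with rfl | rfl | rfl <;> rcases hdc with rfl | rfl | rfl
    all_goals try exact absurd ⟨rfl, rfl⟩ h3
    all_goals simp

def dirsList : List (Int × Int) :=
  [((-1 : Int), (0 : Int)), (1, 0), (0, -1), (0, 1), (-1, -1), (-1, 1), (1, -1), (1, 1)]

lemma mem_dirs (a c : Int) (h1 : a.natAbs ≤ 1) (h2 : c.natAbs ≤ 1) (h3 : ¬(a = 0 ∧ c = 0)) :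
    (a, c) ∈ dirsList := by
  have ha : a = -1 ∨ a = 0 ∨ a = 1 := by omega
  have hc : c = -1 ∨ c = 0 ∨ c = 1 := by omega
  rcases ha with rfl | rfl | rfl <;> rcases hc with rfl | rfl | rfl <;> simp_all [dirsList]

lemma mem_dirs_facts (dr dc : Int) (h : (dr, dc) ∈ dirsList) :
    dr.natAbs ≤ 1 ∧ dc.natAbs ≤ 1 ∧ ¬(dr = 0 ∧ dc = 0) := by
  simp only [dirsList, List.mem_cons, List.not_mem_nil, or_false, Prod.mk.injEq] at h
  rcases h with ⟨rfl, rfl⟩ | ⟨rfl, rfl⟩ | ⟨rfl, rfl⟩ | ⟨rfl, rfl⟩ | ⟨rfl, rfl⟩ | ⟨rfl, rfl⟩ |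
    ⟨rfl, rfl⟩ | ⟨rfl, rfl⟩ <;> simp

lemma rowAt_le_max (b : List (List String)) (r : Int) :
    (rowAt b r).length ≤ b.foldr (fun row m => Nat.max row.length m) 0 := by
  unfold rowAt
  cases hx : b[r.toNat]? with
  | none => simp
  | some row => simpa using row_le_max b row (List.mem_of_getElem? hx)

lemma main_eq (b : List (List String)) (kr kc : Int) :
    check_queen b kr kc = check_queen_alt b kr kc := by
  rw [Bool.eq_iff_iff, a_iff, alt_iff]
  constructor
  · -- A finds a queen along a ray ⇒ B finds that queen
    rintro ⟨dr, dc, hmem, hw⟩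
    obtain ⟨hd1, hd2, hd3⟩ := mem_dirs_facts dr dc (by simpa [dirsList] using hmem)
    have hw1 : walkA b dr dc (kr + ((1 : Nat) : Int) * dr) (kc + ((1 : Nat) : Int) * dc)
        (fuelFor b) = true := by push_cast; simpa using hw
    rw [walk_iff] at hw1
    obtain ⟨k, hk1, hk2, hQ, hcl⟩ := hw1
    obtain ⟨hr0, hrl, hc0, hcl2⟩ := (valid_iff b _ _).1 hQ.1
    obtain ⟨hf1, hf2, hf3, hf4, hf5⟩ := dir_facts dr dc k hk1 hd1 hd2 hd3
    have hrkN : (kr + (k : Int) * dr).toNat < b.length := by omega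
    have hrow : rowAt b (kr + (k : Int) * dr) = b[(kr + (k : Int) * dr).toNat] := by
      unfold rowAt; rw [List.getElem?_eq_getElem hrkN]; rfl
    have hckN : (kc + (k : Int) * dc).toNat < (b[(kr + (k : Int) * dr).toNat]).length := by
      rw [← hrow]; omega
    have hrI : (((kr + (k : Int) * dr).toNat : Nat) : Int) = kr + (k : Int) * dr := by omega
    have hcI : (((kc + (k : Int) * dc).toNat : Nat) : Int) = kc + (k : Int) * dc := by omega
    have e1 : kr + (k : Int) * dr - kr = (k : Int) * dr := by ring
    have e2 : kc + (k : Int) * dc - kc = (k : Int) * dc := by ring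
    refine ⟨(kr + (k : Int) * dr).toNat, hrkN, (kc + (k : Int) * dc).toNat, hckN, ?_, ?_, ?_, ?_⟩
    · have hp := pieceAtA_eq b (kr + (k : Int) * dr) (kc + (k : Int) * dc) hr0 hc0 hcl2
      rw [hrow, List.getElem?_eq_getElem hckN] at hp
      rw [hQ.2] at hp
      simpa using hp.symm
    · rw [hrI, hcI]
      rintro ⟨u1, u2⟩
      exact hf1 ⟨by omega, by omega⟩
    · rw [hrI, hcI, e1, e2]
      exact hf2
    · rw [hrI, hcI, e1, e2, clear_between_iff, hf3, hf4, hf5]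
      exact hcl
  · -- B finds a queen with clear line of sight ⇒ A's ray towards it finds a queen
    rintro ⟨rk, hr, ck, hc, hQ, hne, hal, hcb⟩
    set dr' : Int := (rk : Int) - kr with hdr'
    set dc' : Int := (ck : Int) - kc with hdc'
    have hne2 : ¬(dr' = 0 ∧ dc' = 0) := fun ⟨u1, u2⟩ => hne ⟨by omega, by omega⟩
    set k : Nat := Nat.max dr'.natAbs dc'.natAbs with hkdef
    clear_value k dr' dc'
    have hmaxl : dr'.natAbs ≤ k := by rw [hkdef]; exact Nat.le_max_left _ _
    have hmaxr : dc'.natAbs ≤ k := by rw [hkdef]; exact Nat.le_max_right _ _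
    have hmaxc : k = dr'.natAbs ∨ k = dc'.natAbs := by rw [hkdef]; exact max_choice _ _
    have hk1 : 1 ≤ k := by
      rcases not_and_or.1 hne2 with h | h <;> omega
    have hsr : (k : Int) * dr'.sign = dr' := by
      rcases hal with h | h | h
      · rw [show dr' = 0 from h]; simp
      · have hk : k = dr'.natAbs := by omega
        rw [hk, mul_comm]; exact Int.sign_mul_natAbs dr'
      · have hk : k = dr'.natAbs := by omega
        rw [hk, mul_comm]; exact Int.sign_mul_natAbs dr'
    have hsc : (k : Int) * dc'.sign = dc' := by
      rcases hal with h | h | h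
      · have hk : k = dc'.natAbs := by omega
        rw [hk, mul_comm]; exact Int.sign_mul_natAbs dc'
      · rw [show dc' = 0 from h]; simp
      · have hk : k = dc'.natAbs := by omega
        rw [hk, mul_comm]; exact Int.sign_mul_natAbs dc'
    have hsa : dr'.sign.natAbs ≤ 1 := by rcases sign_cases dr' with h | h | h <;> simp [h]
    have hsb : dc'.sign.natAbs ≤ 1 := by rcases sign_cases dc' with h | h | h <;> simp [h]
    have hs3 : ¬(dr'.sign = 0 ∧ dc'.sign = 0) := by
      rintro ⟨u1, u2⟩
      rw [u1, mul_zero] at hsr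
      rw [u2, mul_zero] at hsc
      exact hne2 ⟨hsr.symm ▸ rfl, hsc.symm ▸ rfl⟩
    have hrI : rowAt b ((rk : Int)) = b[rk] := by
      unfold rowAt; rw [Int.toNat_natCast, List.getElem?_eq_getElem hr]; rfl
    have he1 : kr + (k : Int) * dr'.sign = (rk : Int) := by rw [hsr]; omega
    have he2 : kc + (k : Int) * dc'.sign = (ck : Int) := by rw [hsc]; omega
    have hQat : Qat b kr kc dr'.sign dc'.sign k := by
      constructor
      · rw [valid_iff, he1, he2, hrI]
        exact ⟨by omega, by omega, by omega, by omega⟩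
      · rw [he1, he2]
        have hp := pieceAtA_eq b (rk : Int) (ck : Int) (by omega) (by omega)
          (by rw [hrI]; omega)
        rw [hrI, Int.toNat_natCast, List.getElem?_eq_getElem hc] at hp
        simpa [hQ] using hp
    have hclear : ClearUpto b kr kc dr'.sign dc'.sign 1 k := by
      rw [clear_between_iff] at hcb
      rw [hkdef]
      exact hcb
    have hkb : k ≤ fuelFor b := by
      unfold fuelFor
      by_cases h2 : k ≤ 1
      · omega
      · have hj1 := hclear 1 (le_refl 1) (by omega)
        rw [emptyAtB_iff, valid_iff] at hj1
        obtain ⟨⟨ha1, ha2, ha3, ha4⟩, -⟩ := hj1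
        have hA := rowAt_le_max b (kr + ((1 : Nat) : Int) * dr'.sign)
        have hB := rowAt_le_max b ((rk : Int))
        have hck2 : (ck : Int) < ((rowAt b ((rk : Int))).length : Int) := by rw [hrI]; omega
        rcases sign_cases dr' with h | h | h <;> rcases sign_cases dc' with h' | h' | h' <;>
          simp only [h, h'] at hsr hsc ha1 ha2 ha3 ha4 hA <;> omega
    refine ⟨dr'.sign, dc'.sign, by simpa [dirsList] using mem_dirs dr'.sign dc'.sign hsa hsb hs3, ?_⟩
    have h1 : walkA b dr'.sign dc'.sign (kr + ((1 : Nat) : Int) * dr'.sign)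
        (kc + ((1 : Nat) : Int) * dc'.sign) (fuelFor b) = true := by
      rw [walk_iff]
      exact ⟨k, hk1, by omega, hQat, hclear⟩
    simpa using h1
-- ===== VERDICT (by name: the statement is the Claim_ definition above) =====
theorem check_queen_spec : Claim_equal_check_queen := by
  intro board kr kc _
  exact (main_eq board kr kc)
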